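-- pv_equiv track=rewrite | github.com/jgojnich-a11y/enhanced-social-golfer-problem | summarise_unmet_pairs.py | compute_unmet_pairs
-- ===== SOURCE A (Python) =====
-- from itertools import combinations
--
-- def compute_unmet_pairs(R, N):
--     """Returns sorted list of pairs that never meet."""
--     all_players = range(1, N+1)
--     all_pairs = set(combinations(all_players, 2))
--     met_pairs = set()
--
--     for round_groups in R:
--         for group in round_groups:
--             for pair in combinations(group, 2):
--                 met_pairs.add(tuple(sorted(pair)))
--
--     unmet = sorted(all_pairs - met_pairs)
--     return unmet
-- ===== SOURCE B (Python) =====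
-- from itertools import combinations
--
-- def compute_unmet_pairs(R, N):
--     """Returns sorted list of pairs that never meet."""
--     met = {}
--     for round_groups in R:
--         for group in round_groups:
--             for a, b in combinations(group, 2):
--                 met[a] = met.get(a, set()) | {b}
--                 met[b] = met.get(b, set()) | {a}
--     out = []
--     for i in range(1, N + 1):
--         mi = met.get(i, set())
--         for j in range(i + 1, N + 1):
--             if j not in mi:
--                 out.append((i, j))
--     return out
-- ===== Notes on version B (the rewrite author's own statement) =====
-- stated objective: alternative
-- what changed: Instead of materialising the set of all N*(N-1)/2 pair tuples, subtracting the met-pairs set and sorting the difference, B builds a per-player neighbour dict and emits unmet pairs directly from a nested i<j index loop, which already produces them in lexicographic order with no final sort.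
import Mathlib
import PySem

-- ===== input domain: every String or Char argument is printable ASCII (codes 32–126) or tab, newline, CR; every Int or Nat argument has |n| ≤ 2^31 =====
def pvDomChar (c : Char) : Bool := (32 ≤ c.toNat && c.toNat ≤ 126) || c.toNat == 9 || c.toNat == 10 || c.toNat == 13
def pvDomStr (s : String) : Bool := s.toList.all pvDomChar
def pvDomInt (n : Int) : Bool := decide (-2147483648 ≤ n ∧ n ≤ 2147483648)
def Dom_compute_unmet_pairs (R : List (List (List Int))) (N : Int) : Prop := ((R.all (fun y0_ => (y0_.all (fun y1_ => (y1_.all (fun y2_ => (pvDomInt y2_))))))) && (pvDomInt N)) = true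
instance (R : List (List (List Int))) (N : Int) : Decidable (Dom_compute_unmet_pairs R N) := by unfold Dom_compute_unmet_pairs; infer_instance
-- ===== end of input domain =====

-- B replaces A's set-of-all-pairs difference plus final sort by a per-player neighbour dict and a
-- nested index loop that emits the unmet pairs already in lexicographic order (alternative decomposition).

-- ===== PORT A =====
def compute_unmet_pairs (R : List (List (List Int))) (N : Int) : List (List Int) :=
  let all_players := PySem.List.pyRange 1 (N + 1)
  let all_pairs : PySem.Set (List Int) := PySem.Set.ofList (PySem.List.combinations all_players 2)
  let met_pairs : PySem.Set (List Int) :=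
    R.foldl (fun mp round_groups =>
      round_groups.foldl (fun mp group =>
        (PySem.List.combinations group 2).foldl
          (fun mp pair => mp.add (PySem.List.sorted pair (fun x => x))) mp) mp)
      PySem.Set.empty
  PySem.List.sorted (PySem.Set.diff all_pairs met_pairs) (fun x => x)

-- ===== PORT B =====
def compute_unmet_pairs_alt (R : List (List (List Int))) (N : Int) : List (List Int) :=
  let met : PySem.Dict Int (PySem.Set Int) :=
    R.foldl (fun met round_groups =>
      round_groups.foldl (fun met group =>
        (PySem.List.combinations group 2).foldl
          (fun met pair =>
            match pair with
            | [a, b] =>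
              let met1 := met.insert a ((met.getD a PySem.Set.empty).union [b])
              met1.insert b ((met1.getD b PySem.Set.empty).union [a])
            | _ => met) met) met)
      PySem.Dict.empty
  (PySem.List.pyRange 1 (N + 1)).foldl (fun out i =>
    let mi := met.getD i PySem.Set.empty
    (PySem.List.pyRange (i + 1) (N + 1)).foldl
      (fun out j => if j ∉ mi then out ++ [[i, j]] else out) out) []

-- ===== PRECONDITION & SPEC =====
def Spec_compute_unmet_pairs (R : List (List (List Int))) (N : Int) (out : List (List Int)) : Prop := out = compute_unmet_pairs_alt R N
instance (R : List (List (List Int))) (N : Int) (out : List (List Int)) : Decidable (Spec_compute_unmet_pairs R N out) := by unfold Spec_compute_unmet_pairs; infer_instance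

-- ===== CLAIM (what is proved, stated in full; the proofs are below) =====
def Claim_equal_compute_unmet_pairs : Prop := ∀ (R : List (List (List Int))) (N : Int), Dom_compute_unmet_pairs R N → Spec_compute_unmet_pairs R N (compute_unmet_pairs R N)

-- ===== LEMMAS AND PROOFS =====

-- Python's tuple(sorted((x, y))) for two ints
def pvSpair (x y : Int) : List Int := if y < x then [y, x] else [x, y]

theorem pvSorted_pair (a b : Int) :
    PySem.List.sorted [a, b] (fun x => x) = pvSpair a b := by
  simp [PySem.List.sorted_eq_foldl_insertBy, PySem.List.insertBy, pvSpair]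

theorem pvSpair_eq_iff (x y a b : Int) :
    pvSpair x y = pvSpair a b ↔ (x = a ∧ y = b) ∨ (x = b ∧ y = a) := by
  unfold pvSpair; split_ifs <;> simp <;> omega

-- A's met-pairs set / B's met dict, pulled out of the ports (definitionally equal to the ports' lets)
def pvMetA (R : List (List (List Int))) : PySem.Set (List Int) :=
  R.foldl (fun mp round_groups =>
    round_groups.foldl (fun mp group =>
      (PySem.List.combinations group 2).foldl
        (fun mp pair => mp.add (PySem.List.sorted pair (fun x => x))) mp) mp)
    PySem.Set.empty

def pvMetB (R : List (List (List Int))) : PySem.Dict Int (PySem.Set Int) :=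
  R.foldl (fun met round_groups =>
    round_groups.foldl (fun met group =>
      (PySem.List.combinations group 2).foldl
        (fun met pair =>
          match pair with
          | [a, b] =>
            let met1 := met.insert a ((met.getD a PySem.Set.empty).union [b])
            met1.insert b ((met1.getD b PySem.Set.empty).union [a])
          | _ => met) met) met)
    PySem.Dict.empty

-- the coupling invariant between the two met structures
def pvInv (s : PySem.Set (List Int)) (d : PySem.Dict Int (PySem.Set Int)) : Prop :=
  ∀ x y : Int, y ∈ d.getD x PySem.Set.empty ↔ pvSpair x y ∈ s

theorem pvInv_step (s : PySem.Set (List Int)) (d : PySem.Dict Int (PySem.Set Int))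
    (a b : Int) (h : pvInv s d) :
    pvInv (s.add (pvSpair a b))
      ((d.insert a ((d.getD a PySem.Set.empty).union [b])).insert b
        (((d.insert a ((d.getD a PySem.Set.empty).union [b])).getD b PySem.Set.empty).union [a])) := by
  intro x y
  rw [PySem.Set.mem_add, ← h x y, pvSpair_eq_iff]
  simp only [PySem.Dict.getD_insert]
  split_ifs <;> subst_vars <;> simp [PySem.Set.mem_union] <;> tauto

theorem pvInv_foldPairs (ps : List (List Int)) (s : PySem.Set (List Int))
    (d : PySem.Dict Int (PySem.Set Int)) (hps : ∀ p ∈ ps, p.length = 2) (h : pvInv s d) :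
    pvInv (ps.foldl (fun mp pair => mp.add (PySem.List.sorted pair (fun x => x))) s)
      (ps.foldl (fun met pair =>
          match pair with
          | [a, b] =>
            let met1 := met.insert a ((met.getD a PySem.Set.empty).union [b])
            met1.insert b ((met1.getD b PySem.Set.empty).union [a])
          | _ => met) d) := by
  induction ps generalizing s d with
  | nil => exact h
  | cons p ps ih =>
    obtain ⟨a, b, rfl⟩ : ∃ a b : Int, p = [a, b] := by
      have := hps p (List.mem_cons_self ..)
      match p with
      | [a, b] => exact ⟨a, b, rfl⟩
    simp only [List.foldl_cons, pvSorted_pair]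
    exact ih _ _ (fun q hq => hps q (List.mem_cons_of_mem _ hq)) (pvInv_step s d a b h)

theorem pvInv_foldGroups (gs : List (List Int)) (s : PySem.Set (List Int))
    (d : PySem.Dict Int (PySem.Set Int)) (h : pvInv s d) :
    pvInv (gs.foldl (fun mp group =>
            (PySem.List.combinations group 2).foldl
              (fun mp pair => mp.add (PySem.List.sorted pair (fun x => x))) mp) s)
      (gs.foldl (fun met group =>
          (PySem.List.combinations group 2).foldl
            (fun met pair =>
              match pair with
              | [a, b] =>
                let met1 := met.insert a ((met.getD a PySem.Set.empty).union [b])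
                met1.insert b ((met1.getD b PySem.Set.empty).union [a])
              | _ => met) met) d) := by
  induction gs generalizing s d with
  | nil => exact h
  | cons g gs ih =>
    simp only [List.foldl_cons]
    refine ih _ _ (pvInv_foldPairs _ _ _ (fun p hp => ?_) h)
    exact ((PySem.List.mem_combinations_iff _ _ _).mp hp).2

theorem pvInv_foldRounds (R : List (List (List Int))) (s : PySem.Set (List Int))
    (d : PySem.Dict Int (PySem.Set Int)) (h : pvInv s d) :
    pvInv (R.foldl (fun mp round_groups =>
            round_groups.foldl (fun mp group =>
              (PySem.List.combinations group 2).foldl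
                (fun mp pair => mp.add (PySem.List.sorted pair (fun x => x))) mp) mp) s)
      (R.foldl (fun met round_groups =>
          round_groups.foldl (fun met group =>
            (PySem.List.combinations group 2).foldl
              (fun met pair =>
                match pair with
                | [a, b] =>
                  let met1 := met.insert a ((met.getD a PySem.Set.empty).union [b])
                  met1.insert b ((met1.getD b PySem.Set.empty).union [a])
                | _ => met) met) met) d) := by
  induction R generalizing s d with
  | nil => exact h
  | cons rg R ih =>
    simp only [List.foldl_cons]
    exact ih _ _ (pvInv_foldGroups rg s d h)

theorem pvInv_met (R : List (List (List Int))) : pvInv (pvMetA R) (pvMetB R) := by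
  refine pvInv_foldRounds R _ _ (fun x y => ?_)
  simp [PySem.Dict.getD_empty, PySem.Set.empty]

theorem pvNodup_comb {α : Type} (xs : List α) (r : Nat) (h : xs.Nodup) :
    (PySem.List.combinations xs r).Nodup := by
  induction xs generalizing r with
  | nil =>
    cases r with
    | zero => simp [PySem.List.combinations_zero]
    | succ r => simp [PySem.List.combinations_nil_succ]
  | cons x xs ih =>
    cases r with
    | zero => simp [PySem.List.combinations_zero]
    | succ r =>
      rw [PySem.List.combinations_cons_succ]
      have hx : x ∉ xs := (List.nodup_cons.mp h).1
      have hxs : xs.Nodup := (List.nodup_cons.mp h).2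
      refine List.Nodup.append ((ih r hxs).map fun c₁ c₂ hc => by injection hc) (ih (r+1) hxs) ?_
      rw [List.disjoint_left]
      intro c hc1 hc2
      obtain ⟨c', _, rfl⟩ := List.mem_map.mp hc1
      have hsub := (PySem.List.mem_combinations_iff _ _ _).mp hc2 |>.1
      exact hx (hsub.mem (List.mem_cons_self ..))

theorem pvComb2_range (n : Nat) : ∀ a b : Int, (b - a).toNat = n →
    PySem.List.combinations (PySem.List.pyRange a b) 2 =
      (PySem.List.pyRange a b).flatMap
        (fun i => (PySem.List.pyRange (i + 1) b).map (fun j => [i, j])) := by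
  induction n with
  | zero =>
    intro a b hn
    have hr : PySem.List.pyRange a b = [] := by
      rw [PySem.List.pyRange_one, hn]; simp
    rw [hr]
    simp [PySem.List.combinations_nil_succ]
  | succ n ih =>
    intro a b hn
    have hab : a < b := by omega
    rw [PySem.List.pyRange_one_cons hab, PySem.List.combinations_cons_succ,
      PySem.List.combinations_one, List.map_map, List.flatMap_cons,
      ih (a + 1) b (by omega)]
    simp [Function.comp_def]

theorem pvPairwise_flat (a b : Int) :
    ((PySem.List.pyRange a b).flatMap
        (fun i => (PySem.List.pyRange (i + 1) b).map (fun j => [i, j]))).Pairwise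
      (fun p q : List Int => p < q) := by
  rw [List.pairwise_flatMap]
  constructor
  · intro i _
    rw [List.pairwise_map]
    refine (PySem.List.pairwise_lt_pyRange_one _ _).imp fun h12 => ?_
    rw [List.cons_lt_cons_iff]
    exact Or.inr ⟨rfl, by rw [List.cons_lt_cons_iff]; exact Or.inl h12⟩
  · refine (PySem.List.pairwise_lt_pyRange_one a b).imp fun {i1 i2} h12 => ?_
    intro x hx y hy
    obtain ⟨j1, _, rfl⟩ := List.mem_map.mp hx
    obtain ⟨j2, _, rfl⟩ := List.mem_map.mp hy
    rw [List.cons_lt_cons_iff]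
    exact Or.inl h12

-- ===== VERDICT (by name: the statement is the Claim_ definition above) =====
theorem pvInner (mi : PySem.Set Int) (i : Int) (l : List Int) (out : List (List Int)) :
    l.foldl (fun out j => if j ∉ mi then out ++ [[i, j]] else out) out =
      out ++ (l.filter (fun j => decide (j ∉ mi))).map (fun j => [i, j]) := by
  rw [← PySem.List.foldl_append_if (fun j => decide (j ∉ mi)) (fun j => [i, j])]
  exact PySem.List.foldl_congr_mem _ _ _ _ (fun acc j _ => by simp)

theorem pvB_flat (R : List (List (List Int))) (N : Int) :
    compute_unmet_pairs_alt R N =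
      (PySem.List.pyRange 1 (N + 1)).flatMap (fun i =>
        ((PySem.List.pyRange (i + 1) (N + 1)).filter
            (fun j => decide (j ∉ (pvMetB R).getD i PySem.Set.empty))).map (fun j => [i, j])) := by
  show (PySem.List.pyRange 1 (N + 1)).foldl (fun out i =>
      (PySem.List.pyRange (i + 1) (N + 1)).foldl
        (fun out j => if j ∉ (pvMetB R).getD i PySem.Set.empty then out ++ [[i, j]] else out) out) [] = _
  rw [PySem.List.foldl_congr_mem _ _
      (fun out i => out ++ ((PySem.List.pyRange (i + 1) (N + 1)).filter
          (fun j => decide (j ∉ (pvMetB R).getD i PySem.Set.empty))).map (fun j => [i, j])) _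
      (fun out i _ => pvInner _ i _ out),
    PySem.List.foldl_append_eq_flatMap, List.nil_append]

theorem pvA_filter (R : List (List (List Int))) (N : Int) :
    compute_unmet_pairs R N =
      PySem.List.sorted
        ((PySem.List.combinations (PySem.List.pyRange 1 (N + 1)) 2).filter
          (fun p => !(PySem.Set.contains (pvMetA R) p))) (fun x => x) := by
  show PySem.List.sorted
      (PySem.Set.diff (PySem.Set.ofList (PySem.List.combinations (PySem.List.pyRange 1 (N + 1)) 2)) (pvMetA R))
      (fun x => x) = _
  rw [PySem.Set.ofList_eq_self_of_nodup _
    (pvNodup_comb _ 2 (PySem.List.nodup_pyRange_one 1 (N + 1)))]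
  rfl

-- ===== VERDICT (by name: the statement is the Claim_ definition above) =====
theorem compute_unmet_pairs_spec : Claim_equal_compute_unmet_pairs := by
  intro R N _
  unfold Spec_compute_unmet_pairs
  rw [pvA_filter, pvB_flat,
    pvComb2_range ((N + 1) - 1).toNat 1 (N + 1) rfl, List.filter_flatMap]
  have hbody : ∀ i ∈ PySem.List.pyRange 1 (N + 1),
      (List.filter (fun p => !(PySem.Set.contains (pvMetA R) p))
        ((PySem.List.pyRange (i + 1) (N + 1)).map (fun j => [i, j]))) =
      ((PySem.List.pyRange (i + 1) (N + 1)).filter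
          (fun j => decide (j ∉ (pvMetB R).getD i PySem.Set.empty))).map (fun j => [i, j]) := by
    intro i _
    rw [List.filter_map]
    refine congrArg _ (List.filter_congr fun j hj => ?_)
    have hij : i < j := ((PySem.List.mem_pyRange_one).mp hj).1.trans_lt' (by omega)
    have hsp : pvSpair i j = [i, j] := by unfold pvSpair; rw [if_neg (by omega)]
    have h2 : (j ∈ (pvMetB R).getD i PySem.Set.empty) ↔ [i, j] ∈ pvMetA R := by
      rw [pvInv_met R i j, hsp]
    rw [Bool.eq_iff_iff]
    simp
    exact not_congr h2.symm
  rw [List.flatMap_congr hbody]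
  have hpw : (List.flatMap (fun i =>
      ((PySem.List.pyRange (i + 1) (N + 1)).filter
          (fun j => decide (j ∉ (pvMetB R).getD i PySem.Set.empty))).map (fun j => [i, j]))
      (PySem.List.pyRange 1 (N + 1))).Pairwise (fun a b : List Int => a ≤ b) := by
    rw [← List.flatMap_congr hbody, ← List.filter_flatMap]
    exact (List.Pairwise.sublist List.filter_sublist (pvPairwise_flat 1 (N + 1))).imp le_of_lt
  have hI : (fun (a b : List Int) => a.decidableLT b) = (LinearOrder.toDecidableLT (α := List Int)) := by
    funext a b; exact Subsingleton.elim _ _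
  rw [hI]
  exact PySem.List.sorted_eq_self_of_pairwise _ _ hpw
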